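-- pv_equiv track=rewrite | github.com/at0m-b0mb/DiskImager | disktool/platform/windows.py | _parse_wmic_list
-- ===== SOURCE A (Python) =====
-- def _parse_wmic_list(output: str) -> list[dict[str, str]]:
--     """Parse WMIC /FORMAT:LIST output into a list of dicts."""
--     items: list[dict[str, str]] = []
--     current: dict[str, str] = {}
--     for line in output.splitlines():
--         line = line.strip()
--         if not line:
--             if current:
--                 items.append(current)
--                 current = {}
--             continue
--         if "=" in line:
--             key, _, value = line.partition("=")
--             current[key.strip()] = value.strip()
--     if current:
--         items.append(current)
--     return items
-- ===== SOURCE B (Python) =====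
-- def _parse_wmic_list(output: str) -> list[dict[str, str]]:
--     """Parse WMIC /FORMAT:LIST output into a list of dicts.
--
--     Two-phase decomposition: first split the lines into blocks separated by
--     blank lines (flushing unconditionally, so empty blocks may appear), then
--     turn each block into a dict and keep only the non-empty dicts.
--     """
--     blocks: list[list[str]] = []
--     block: list[str] = []
--     for line in output.splitlines():
--         if line.strip():
--             block.append(line)
--         else:
--             blocks.append(block)
--             block = []
--     blocks.append(block)
--
--     items: list[dict[str, str]] = []
--     for blk in blocks:
--         d: dict[str, str] = {}
--         for raw in blk:
--             s = raw.strip()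
--             if "=" in s:
--                 key, _, value = s.partition("=")
--                 d[key.strip()] = value.strip()
--         if d:
--             items.append(d)
--     return items
-- ===== Notes on version B (the rewrite author's own statement) =====
-- stated objective: alternative
-- what changed: Replaced the single-pass running-dict accumulator with blank-line flush/reset by a two-phase decomposition: split the lines into blank-separated blocks (flushing unconditionally), then map each block to a dict and keep the non-empty ones.
import Mathlib
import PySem

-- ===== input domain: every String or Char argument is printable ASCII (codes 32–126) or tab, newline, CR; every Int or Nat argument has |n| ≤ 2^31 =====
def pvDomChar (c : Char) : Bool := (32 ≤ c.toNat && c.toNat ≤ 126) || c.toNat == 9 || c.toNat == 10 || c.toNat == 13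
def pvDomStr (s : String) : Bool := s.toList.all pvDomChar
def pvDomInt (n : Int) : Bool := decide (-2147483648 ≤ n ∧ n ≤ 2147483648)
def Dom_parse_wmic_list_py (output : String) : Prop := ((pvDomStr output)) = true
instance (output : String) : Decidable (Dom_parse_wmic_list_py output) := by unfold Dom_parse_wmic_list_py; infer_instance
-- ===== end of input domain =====

-- B replaces A's single-pass running-dict accumulator (with blank-line flush/reset) by a
-- two-phase decomposition: split lines into blank-separated blocks, then map blocks to dicts,
-- keeping the non-empty ones; same cost, proved to return the same value on every input.


-- ===== PORT A =====
-- str.partition("=") when '=' is present: characters before the first '=' and after it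
def pwlPartitionEq : List Char → List Char × List Char
  | [] => ([], [])
  | c :: cs =>
    if c = '=' then ([], cs)
    else
      let p := pwlPartitionEq cs
      (c :: p.1, p.2)

-- the '=' line handling both Pythons share textually: «key, _, value = line.partition("="); cur[key.strip()] = value.strip()»
def pwlUpd (d : PySem.Dict String String) (l : List Char) : PySem.Dict String String :=
  if PySem.Chars.isIn ['='] l then
    let p := pwlPartitionEq l
    d.insert (String.ofList (PySem.Chars.strip p.1)) (String.ofList (PySem.Chars.strip p.2))
  else d

-- A's loop body: state = (items, current)
def pwlStepA (st : List (PySem.Dict String String) × PySem.Dict String String) (line : String) :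
    List (PySem.Dict String String) × PySem.Dict String String :=
  let l := (PySem.Str.strip line).toList
  if l = [] then
    if st.2.size = 0 then st else (st.1 ++ [st.2], PySem.Dict.empty)
  else
    (st.1, pwlUpd st.2 l)

def parse_wmic_list_py (output : String) : List (List (String × String)) :=
  let st := (PySem.Str.splitlines output).foldl pwlStepA ([], PySem.Dict.empty)
  (if st.2.size = 0 then st.1 else st.1 ++ [st.2]).map (·.items)

-- ===== PORT B =====
-- phase-1 loop body: state = (blocks, block); blank line flushes unconditionally
def pwlStepB (st : List (List String) × List String) (line : String) :
    List (List String) × List String :=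
  if (PySem.Str.strip line).toList ≠ [] then (st.1, st.2 ++ [line])
  else (st.1 ++ [st.2], [])

-- phase-2 inner loop: build the dict of one block
def pwlMkd (blk : List String) : PySem.Dict String String :=
  blk.foldl (fun d raw => pwlUpd d (PySem.Str.strip raw).toList) PySem.Dict.empty

-- phase-2 outer loop body: keep non-empty dicts
def pwlEmit (acc : List (PySem.Dict String String)) (blk : List String) :
    List (PySem.Dict String String) :=
  let d := pwlMkd blk
  if d.size = 0 then acc else acc ++ [d]

def parse_wmic_list_py_alt (output : String) : List (List (String × String)) :=
  let st := (PySem.Str.splitlines output).foldl pwlStepB ([], [])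
  ((st.1 ++ [st.2]).foldl pwlEmit []).map (·.items)

-- ===== PRECONDITION & SPEC =====
def Spec_parse_wmic_list_py (output : String) (out : List (List (String × String))) : Prop := out = parse_wmic_list_py_alt output
instance (output : String) (out : List (List (String × String))) : Decidable (Spec_parse_wmic_list_py output out) := by unfold Spec_parse_wmic_list_py; infer_instance

-- ===== CLAIM (what is proved, stated in full; the proofs are below) =====
def Claim_equal_parse_wmic_list_py : Prop := ∀ (output : String), Dom_parse_wmic_list_py output → Spec_parse_wmic_list_py output (parse_wmic_list_py output)

-- ===== LEMMAS AND PROOFS =====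

-- A's final flush, as a function
def pwlFinA (st : List (PySem.Dict String String) × PySem.Dict String String) :
    List (PySem.Dict String String) :=
  if st.2.size = 0 then st.1 else st.1 ++ [st.2]

lemma pwlStepA_blank (st : List (PySem.Dict String String) × PySem.Dict String String)
    (line : String) (h : (PySem.Str.strip line).toList = []) :
    pwlStepA st line = if st.2.size = 0 then st else (st.1 ++ [st.2], PySem.Dict.empty) := by
  simp only [pwlStepA]; rw [if_pos h]

lemma pwlStepA_nonblank (st : List (PySem.Dict String String) × PySem.Dict String String)
    (line : String) (h : ¬ (PySem.Str.strip line).toList = []) :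
    pwlStepA st line = (st.1, pwlUpd st.2 (PySem.Str.strip line).toList) := by
  simp only [pwlStepA]; rw [if_neg h]

lemma pwlStepB_blank (st : List (List String) × List String)
    (line : String) (h : (PySem.Str.strip line).toList = []) :
    pwlStepB st line = (st.1 ++ [st.2], []) := by
  simp only [pwlStepB]; rw [if_neg (not_not_intro h)]

lemma pwlStepB_nonblank (st : List (List String) × List String)
    (line : String) (h : ¬ (PySem.Str.strip line).toList = []) :
    pwlStepB st line = (st.1, st.2 ++ [line]) := by
  simp only [pwlStepB]; rw [if_pos h]

lemma pwlMkd_append (blk : List String) (raw : String) :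
    pwlMkd (blk ++ [raw]) = pwlUpd (pwlMkd blk) (PySem.Str.strip raw).toList := by
  simp [pwlMkd, List.foldl_append]

lemma pwlEmit_acc (acc : List (PySem.Dict String String)) (bs : List (List String)) :
    bs.foldl pwlEmit acc = acc ++ bs.foldl pwlEmit [] := by
  induction bs generalizing acc with
  | nil => simp
  | cons b bs ih =>
    simp only [List.foldl_cons]
    rw [ih, ih (pwlEmit [] b)]
    by_cases h0 : (pwlMkd b).size = 0 <;> simp [pwlEmit, h0]

lemma pwlStepB_acc (lines : List String) (bs : List (List String)) (bl : List String) :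
    lines.foldl pwlStepB (bs, bl)
      = (bs ++ (lines.foldl pwlStepB ([], bl)).1, (lines.foldl pwlStepB ([], bl)).2) := by
  induction lines generalizing bs bl with
  | nil => simp
  | cons line rest ih =>
    simp only [List.foldl_cons]
    by_cases h : (PySem.Str.strip line).toList = []
    · rw [pwlStepB_blank _ _ h, pwlStepB_blank ([], bl) _ h]
      rw [ih (bs ++ [bl]) [], ih ([] ++ [bl]) []]
      simp
    · rw [pwlStepB_nonblank _ _ h, pwlStepB_nonblank ([], bl) _ h]
      exact ih bs (bl ++ [line])

lemma pwlDict_eq_empty_of_size_zero (d : PySem.Dict String String) (h : d.size = 0) :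
    d = PySem.Dict.empty := by
  apply PySem.Dict.ext
  have : d.items.length = 0 := h
  simpa [PySem.Dict.empty] using List.length_eq_zero_iff.mp this

lemma pwl_main (lines : List String) (acc : List (PySem.Dict String String)) (bl : List String) :
    pwlFinA (lines.foldl pwlStepA (acc, pwlMkd bl))
      = acc ++ (((lines.foldl pwlStepB ([], bl)).1 ++ [(lines.foldl pwlStepB ([], bl)).2]).foldl pwlEmit []) := by
  induction lines generalizing acc bl with
  | nil =>
    simp only [List.foldl_nil, List.nil_append, List.foldl_cons, pwlFinA, pwlEmit]
    split <;> simp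
  | cons line rest ih =>
    simp only [List.foldl_cons]
    by_cases h : (PySem.Str.strip line).toList = []
    · rw [pwlStepA_blank _ _ h, pwlStepB_blank ([], bl) _ h, List.nil_append,
        pwlStepB_acc rest [bl] []]
      by_cases h0 : (pwlMkd bl).size = 0
      · simp only [h0, if_true]
        have hbl : pwlMkd bl = pwlMkd [] := pwlDict_eq_empty_of_size_zero _ h0
        rw [hbl, ih acc []]
        simp [List.foldl_append, pwlEmit, pwlDict_eq_empty_of_size_zero _ h0]
      · simp only [h0, if_false]
        have he : (PySem.Dict.empty : PySem.Dict String String) = pwlMkd [] := rfl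
        rw [he, ih (acc ++ [pwlMkd bl]) []]
        simp [List.foldl_append, pwlEmit, h0, pwlEmit_acc [pwlMkd bl]]
    · rw [pwlStepA_nonblank _ _ h, pwlStepB_nonblank ([], bl) _ h, ← pwlMkd_append]
      exact ih acc (bl ++ [line])

-- ===== VERDICT (by name: the statement is the Claim_ definition above) =====
theorem parse_wmic_list_py_spec : Claim_equal_parse_wmic_list_py := by
  intro output _
  exact congrArg (List.map fun d => d.items) (pwl_main (PySem.Str.splitlines output) [] [])
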